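-- pv_equiv track=rewrite | github.com/daniel-reich/ubiquitous-fiesta | stXWy2iufNhBo9sTW_7.py | valid_rondo
-- ===== SOURCE A (Python) =====
-- def valid_rondo(s):
--   if len(s) == 1:
--     return False
--   if not s[0] == s[-1] == 'A':
--     return False
--
--   last = -1
--   for c in "BCDEFGHIJ":
--     try :
--       if s.index(c) < last:
--         return False
--       last = s.index(c)
--     except : pass
--
--   for i in range(0,len(s)-1):
--     if s[i] == s[i+1]:
--       return False
--   return True
-- ===== SOURCE B (Python) =====
-- def valid_rondo(s):
--     if len(s) == 1:
--         return False
--     if s[0] != 'A' or s[-1] != 'A':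
--         return False
--     seen = []
--     prev = None
--     for c in s:
--         if c == prev:
--             return False
--         prev = c
--         if 'B' <= c <= 'J' and c not in seen:
--             seen.append(c)
--     return seen == sorted(seen)
-- ===== Notes on version B (the rewrite author's own statement) =====
-- stated objective: simpler
-- what changed: One pass over s that checks adjacent repeats and records the first-appearance order of the letters B..J, followed by a single sortedness test, replaces A's nine separate s.index scans compared against a running lower bound plus a second index-based adjacency loop.
-- outside the precondition, e.g. on valid_rondo(''): A raises IndexError, B raises IndexError
import Mathlib
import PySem

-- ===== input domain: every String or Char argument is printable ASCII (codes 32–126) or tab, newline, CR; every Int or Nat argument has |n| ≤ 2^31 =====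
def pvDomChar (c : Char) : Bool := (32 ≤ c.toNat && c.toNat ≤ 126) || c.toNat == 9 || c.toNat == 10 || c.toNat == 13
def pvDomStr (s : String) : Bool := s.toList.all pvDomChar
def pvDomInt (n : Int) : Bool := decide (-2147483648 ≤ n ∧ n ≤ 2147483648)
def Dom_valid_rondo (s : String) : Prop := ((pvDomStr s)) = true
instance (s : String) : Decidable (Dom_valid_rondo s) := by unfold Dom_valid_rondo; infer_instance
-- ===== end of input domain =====

-- B replaces A's nine s.index scans and separate adjacency loop by one pass that
-- records the first-appearance order of the letters B..J and checks adjacent repeats,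
-- then tests that the recorded order is alphabetical (objective: simpler).

-- ===== PORT A =====
-- the 'for c in "BCDEFGHIJ"' loop; result false = A's early 'return False'
def loopA_valid_rondo (s : String) : List Char → Int → Bool
  | [], _ => true
  | c :: cs, last =>
    let i := PySem.Str.find s (String.ofList [c])   -- s.index(c); -1 ↔ ValueError, caught by 'except: pass'
    if i = -1 then loopA_valid_rondo s cs last
    else if i < last then false
    else loopA_valid_rondo s cs i

-- the 'for i in range(0, len(s)-1)' loop
def adjA_valid_rondo (s : String) : List Int → Bool
  | [] => true
  | i :: is =>
    match PySem.Str.pyGet? s i, PySem.Str.pyGet? s (i + 1) with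
    | some a, some b => if a = b then false else adjA_valid_rondo s is
    | _, _ => adjA_valid_rondo s is   -- unreachable: every i of the range is in bounds

def valid_rondo (s : String) : Bool :=
  if PySem.Str.len s = 1 then false
  else
    match PySem.Str.pyGet? s 0, PySem.Str.pyGet? s (-1) with
    | some c0, some cm =>
      if ¬(c0 = cm ∧ cm = 'A') then false
      else if loopA_valid_rondo s "BCDEFGHIJ".toList (-1) = false then false
      else adjA_valid_rondo s (PySem.List.pyRange 0 (PySem.Str.len s - 1) 1)
    | _, _ => false   -- s = "": Python raises IndexError (excluded by Pre_)

-- ===== PORT B =====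
-- the body of B's single for-loop: update of 'seen'
def bstep_valid_rondo (seen : List Char) (c : Char) : List Char :=
  if ('B' ≤ c ∧ c ≤ 'J') ∧ c ∉ seen then seen ++ [c] else seen

-- B's single pass: none = early 'return False' on an adjacent repeat
def bloop_valid_rondo : List Char → Option Char → List Char → Option (List Char)
  | [], _, seen => some seen
  | c :: cs, prev, seen =>
    if some c = prev then none
    else bloop_valid_rondo cs (some c) (bstep_valid_rondo seen c)

def valid_rondo_alt (s : String) : Bool :=
  let l := s.toList
  if l.length = 1 then false
  else
    match l[0]?, PySem.List.pyGet? l (-1) with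
    | some a, some b =>
      if a ≠ 'A' ∨ b ≠ 'A' then false
      else
        match bloop_valid_rondo l none [] with
        | none => false
        | some seen => decide (seen = PySem.List.sorted seen id)
    | _, _ => false   -- s = "": Python raises IndexError (excluded by Pre_)

-- ===== PRECONDITION & SPEC =====
-- Pre_ excludes only the empty string, on which A (and B) raise IndexError at s[0].
def Pre_valid_rondo (s : String) : Prop := s ≠ ""
instance (s : String) : Decidable (Pre_valid_rondo s) := by unfold Pre_valid_rondo; infer_instance
def pvWitness_valid_rondo : String := "ABACA"

def Spec_valid_rondo (s : String) (out : Bool) : Prop := out = valid_rondo_alt s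
instance (s : String) (out : Bool) : Decidable (Spec_valid_rondo s out) := by unfold Spec_valid_rondo; infer_instance

-- ===== CLAIM (what is proved, stated in full; the proofs are below) =====
def Claim_equal_valid_rondo : Prop := ∀ (s : String), Dom_valid_rondo s → Pre_valid_rondo s → Spec_valid_rondo s (valid_rondo s)

-- ===== LEMMAS AND PROOFS =====

-- proof-only abbreviations
def pvG (l : List Char) (c : Char) : Int := PySem.Chars.find l [c]
def pvBJ : List Char := ['B','C','D','E','F','G','H','I','J']
def pvPres (l : List Char) : List Char := pvBJ.filter (fun c => decide (c ∈ l))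
def pvCollect (l : List Char) : List Char := l.foldl bstep_valid_rondo []
def pvPairOK : Option Char → List Char → Bool
  | _, [] => true
  | p, c :: cs => if some c = p then false else pvPairOK (some c) cs

-- find / first-occurrence facts ------------------------------------------------

theorem pv_single_prefix {c : Char} {t : List Char} : [c] <+: t ↔ t.head? = some c := by
  cases t with
  | nil => simp
  | cons a t =>
    rw [List.cons_prefix_iff]
    constructor
    · rintro ⟨l', heq, -⟩
      rw [List.cons.injEq] at heq
      simp [heq.1]
    · intro h
      simp only [List.head?_cons, Option.some.injEq] at h
      exact ⟨t, by rw [h], List.nil_prefix⟩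

theorem pv_single_infix {c : Char} {l : List Char} : [c] <:+: l ↔ c ∈ l := by
  constructor
  · intro h; exact List.singleton_sublist.1 h.sublist
  · intro h
    obtain ⟨u, v, rfl⟩ := List.append_of_mem h
    exact ⟨u, v, by simp⟩

theorem pv_find_neg {l : List Char} {c : Char} : pvG l c = -1 ↔ c ∉ l := by
  unfold pvG; rw [PySem.Chars.find_eq_neg_one_iff]; exact not_congr pv_single_infix

theorem pv_find_nonneg {l : List Char} {c : Char} : 0 ≤ pvG l c ↔ c ∈ l := by
  unfold pvG; rw [PySem.Chars.find_nonneg_iff]; exact pv_single_infix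

theorem pv_find_get {l : List Char} {c : Char} (h : c ∈ l) :
    l[(pvG l c).toNat]? = some c ∧ ∀ i < (pvG l c).toNat, l[i]? ≠ some c := by
  have h0 : 0 ≤ pvG l c := pv_find_nonneg.2 h
  obtain ⟨h1, h2⟩ := PySem.Chars.find_spec (s := l) (sub := [c]) h0
  refine ⟨?_, ?_⟩
  · rw [← List.head?_drop]; exact pv_single_prefix.1 h1
  · intro i hi hc
    exact h2 i hi (pv_single_prefix.2 (by rw [List.head?_drop]; exact hc))

theorem pv_find_lt_len {l : List Char} {c : Char} (h : c ∈ l) :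
    (pvG l c).toNat < l.length :=
  (List.getElem?_eq_some_iff.1 (pv_find_get h).1).1

theorem pv_find_unique {l : List Char} {c : Char} {k : Nat}
    (h1 : l[k]? = some c) (h2 : ∀ i < k, l[i]? ≠ some c) : pvG l c = k := by
  have hm : c ∈ l := List.mem_of_getElem? h1
  have h0 : 0 ≤ pvG l c := pv_find_nonneg.2 hm
  obtain ⟨g1, g2⟩ := pv_find_get hm
  rcases Nat.lt_trichotomy (pvG l c).toNat k with h | h | h
  · exact absurd g1 (h2 _ h)
  · rw [← Int.toNat_of_nonneg h0, h]
  · exact absurd h1 (g2 _ h)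

theorem pv_find_append_left {l t : List Char} {c : Char} (h : c ∈ l) :
    pvG (l ++ t) c = pvG l c := by
  obtain ⟨g1, g2⟩ := pv_find_get h
  have h0 : 0 ≤ pvG l c := pv_find_nonneg.2 h
  have hlen : (pvG l c).toNat < l.length := pv_find_lt_len h
  have := pv_find_unique (l := l ++ t) (c := c) (k := (pvG l c).toNat)
    (by rw [List.getElem?_append_left hlen]; exact g1)
    (fun i hi => by
      rw [List.getElem?_append_left (lt_trans hi hlen)]; exact g2 i hi)
  rw [this, Int.toNat_of_nonneg h0]

theorem pv_find_append_new {l : List Char} {c : Char} (h : c ∉ l) :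
    pvG (l ++ [c]) c = l.length := by
  apply pv_find_unique
  · simp
  · intro i hi
    rw [List.getElem?_append_left hi]
    intro hc; exact h (List.mem_of_getElem? hc)

theorem pv_find_inj {l : List Char} {a b : Char} (ha : a ∈ l) (hb : b ∈ l)
    (h : pvG l a = pvG l b) : a = b := by
  have g1 := (pv_find_get ha).1
  have g2 := (pv_find_get hb).1
  rw [h, g2] at g1
  exact (Option.some_inj.1 g1).symm

-- the letter range B..J -------------------------------------------------------

theorem pv_range_iff {c : Char} : ('B' ≤ c ∧ c ≤ 'J') ↔ c ∈ pvBJ := by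
  constructor
  · rintro ⟨h1, h2⟩
    rw [Char.le_def, UInt32.le_iff_toNat_le] at h1 h2
    have n1 : 66 ≤ c.val.toNat := h1
    have n2 : c.val.toNat ≤ 74 := h2
    have hd : ∀ (n : Nat) (d : Char), c.val.toNat = n → d.val.toNat = n → c = d :=
      fun n d hc hdn => Char.ext (UInt32.toNat_inj.1 (hc.trans hdn.symm))
    have hv : c.val.toNat = 66 ∨ c.val.toNat = 67 ∨ c.val.toNat = 68 ∨ c.val.toNat = 69 ∨
        c.val.toNat = 70 ∨ c.val.toNat = 71 ∨ c.val.toNat = 72 ∨ c.val.toNat = 73 ∨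
        c.val.toNat = 74 := by omega
    rcases hv with h | h | h | h | h | h | h | h | h
    · rw [hd 66 'B' h rfl]; decide
    · rw [hd 67 'C' h rfl]; decide
    · rw [hd 68 'D' h rfl]; decide
    · rw [hd 69 'E' h rfl]; decide
    · rw [hd 70 'F' h rfl]; decide
    · rw [hd 71 'G' h rfl]; decide
    · rw [hd 72 'H' h rfl]; decide
    · rw [hd 73 'I' h rfl]; decide
    · rw [hd 74 'J' h rfl]; decide
  · intro h
    fin_cases h <;> exact ⟨by decide, by decide⟩

-- B's accumulator: the first-appearance list of the letters B..J ---------------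

theorem pv_collect_append (l : List Char) (x : Char) :
    pvCollect (l ++ [x]) = bstep_valid_rondo (pvCollect l) x := by
  simp [pvCollect, List.foldl_append]

theorem pv_collect_inv (l : List Char) :
    (pvCollect l).Nodup ∧
    (∀ c, c ∈ pvCollect l ↔ (c ∈ l ∧ 'B' ≤ c ∧ c ≤ 'J')) ∧
    List.Pairwise (fun a b => pvG l a < pvG l b) (pvCollect l) := by
  induction l using List.reverseRecOn with
  | nil => simp [pvCollect]
  | append_singleton l x ih =>
    obtain ⟨hn, hm, hp⟩ := ih
    rw [pv_collect_append]
    unfold bstep_valid_rondo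
    by_cases hq : ('B' ≤ x ∧ x ≤ 'J') ∧ x ∉ pvCollect l
    · rw [if_pos hq]
      have hxl : x ∉ l := fun hxl => hq.2 ((hm x).2 ⟨hxl, hq.1⟩)
      refine ⟨?_, ?_, ?_⟩
      · rw [List.nodup_append]
        exact ⟨hn, List.nodup_singleton x, fun a ha b hb => by
          rcases List.mem_singleton.1 hb with rfl
          exact fun h => hq.2 (h ▸ ha)⟩
      · intro c
        simp only [List.mem_append, List.mem_singleton, hm]
        constructor
        · rintro (⟨h1, h2⟩ | rfl)
          · exact ⟨Or.inl h1, h2⟩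
          · exact ⟨Or.inr rfl, hq.1⟩
        · rintro ⟨h1 | rfl, h2⟩
          · by_cases hcx : c = x
            · exact Or.inr hcx
            · exact Or.inl ⟨h1, h2⟩
          · exact Or.inr rfl
      · rw [List.pairwise_append]
        refine ⟨hp.imp_of_mem ?_, List.pairwise_singleton _ _, ?_⟩
        · intro a b ha hb hab
          have hal : a ∈ l := ((hm a).1 ha).1
          have hbl : b ∈ l := ((hm b).1 hb).1
          rwa [pv_find_append_left hal, pv_find_append_left hbl]
        · intro a ha b hb
          rcases List.mem_singleton.1 hb with rfl
          have hal : a ∈ l := ((hm a).1 ha).1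
          rw [pv_find_append_left hal, pv_find_append_new hxl]
          have := pv_find_lt_len hal
          have h0 : 0 ≤ pvG l a := pv_find_nonneg.2 hal
          omega
    · rw [if_neg hq]
      refine ⟨hn, ?_, ?_⟩
      · intro c
        rw [hm c]
        simp only [List.mem_append, List.mem_singleton]
        constructor
        · rintro ⟨h1, h2⟩; exact ⟨Or.inl h1, h2⟩
        · rintro ⟨h1 | rfl, h2⟩
          · exact ⟨h1, h2⟩
          · -- x itself: ¬hq forces x ∈ pvCollect l, hence x ∈ l
            by_cases hx : c ∈ pvCollect l
            · exact ⟨((hm c).1 hx).1, h2⟩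
            · exact absurd ⟨h2, hx⟩ hq
      · refine hp.imp_of_mem ?_
        intro a b ha hb hab
        have hal : a ∈ l := ((hm a).1 ha).1
        have hbl : b ∈ l := ((hm b).1 hb).1
        rwa [pv_find_append_left hal, pv_find_append_left hbl]

-- alphabetically sorted present letters ---------------------------------------

theorem pv_pres_mem {l : List Char} {c : Char} : c ∈ pvPres l ↔ c ∈ pvBJ ∧ c ∈ l := by
  simp [pvPres, List.mem_filter]

theorem pv_pres_pairwise (l : List Char) : List.Pairwise (· < ·) (pvPres l) :=
  List.Pairwise.sublist List.filter_sublist (by decide)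

theorem pv_pres_nodup (l : List Char) : (pvPres l).Nodup :=
  (pv_pres_pairwise l).imp (fun h => ne_of_lt h)

theorem pv_collect_perm_pres (l : List Char) : (pvPres l).Perm (pvCollect l) := by
  obtain ⟨hn, hm, -⟩ := pv_collect_inv l
  rw [List.perm_ext_iff_of_nodup (pv_pres_nodup l) hn]
  intro c
  rw [pv_pres_mem, hm c, ← pv_range_iff]
  tauto

theorem pv_sorted_eq (l : List Char) :
    PySem.List.sorted (pvCollect l) id = pvPres l :=
  PySem.List.sorted_eq_of_perm_of_pairwise_lt _ _ _ (pv_collect_perm_pres l)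
    ((pv_pres_pairwise l).imp (fun h => h))

-- the ordering checks agree ----------------------------------------------------

theorem pv_pairwise_le_cons (a b : Int) (t : List Int) :
    List.Pairwise (· ≤ ·) (a :: b :: t) ↔ a ≤ b ∧ List.Pairwise (· ≤ ·) (b :: t) := by
  constructor
  · intro h
    rcases List.pairwise_cons.1 h with ⟨h1, h2⟩
    exact ⟨h1 b (by simp), h2⟩
  · rintro ⟨hab, h⟩
    refine List.pairwise_cons.2 ⟨?_, h⟩
    intro x hx
    rcases List.mem_cons.1 hx with rfl | hx
    · exact hab
    · exact le_trans hab ((List.pairwise_cons.1 h).1 x hx)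

theorem pv_loopA_iff (s : String) (cs : List Char) (last : Int) :
    loopA_valid_rondo s cs last = true ↔
      List.Pairwise (· ≤ ·)
        (last :: (cs.filter (fun c => decide (pvG s.toList c ≠ -1))).map (pvG s.toList)) := by
  induction cs generalizing last with
  | nil => simp [loopA_valid_rondo]
  | cons c cs ih =>
    have hfind : PySem.Str.find s (String.ofList [c]) = pvG s.toList c := by
      rw [PySem.Str.find_eq]; simp [pvG]
    simp only [loopA_valid_rondo, hfind]
    by_cases h1 : pvG s.toList c = -1
    · rw [if_pos h1]
      rw [List.filter_cons_of_neg (by simp [h1])]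
      exact ih last
    · rw [if_neg h1]
      rw [List.filter_cons_of_pos (by simp [h1])]
      simp only [List.map_cons]
      rw [pv_pairwise_le_cons]
      by_cases h2 : pvG s.toList c < last
      · rw [if_pos h2]
        constructor
        · intro h; exact absurd h (by simp)
        · rintro ⟨h3, -⟩; omega
      · rw [if_neg h2]
        rw [ih]
        constructor
        · intro h; exact ⟨by omega, h⟩
        · rintro ⟨-, h⟩; exact h

theorem pv_ord_iff (l : List Char) :
    List.Pairwise (fun a b => pvG l a ≤ pvG l b) (pvPres l) ↔ pvCollect l = pvPres l := by
  obtain ⟨hn, hm, hp⟩ := pv_collect_inv l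
  constructor
  · intro hle
    have hstrict : List.Pairwise (fun a b => pvG l a < pvG l b) (pvPres l) := by
      refine ((hle.and (pv_pres_nodup l)).imp_of_mem ?_)
      intro a b ha hb hab
      rcases lt_or_eq_of_le hab.1 with h | h
      · exact h
      · exact absurd (pv_find_inj (pv_pres_mem.1 ha).2 (pv_pres_mem.1 hb).2 h) hab.2
    refine List.eq_of_perm_of_sorted ?_ hp hstrict ((pv_collect_perm_pres l).symm)
    intro a b _ _ h1 h2
    omega
  · intro he
    rw [← he]
    exact hp.imp (fun h => le_of_lt h)

-- the adjacency checks agree ---------------------------------------------------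

theorem pv_bloop_eq (cs : List Char) (p : Option Char) (seen : List Char) :
    bloop_valid_rondo cs p seen =
      if pvPairOK p cs then some (cs.foldl bstep_valid_rondo seen) else none := by
  induction cs generalizing p seen with
  | nil => simp [bloop_valid_rondo, pvPairOK]
  | cons c cs ih =>
    by_cases h : some c = p <;>
      simp [bloop_valid_rondo, pvPairOK, h, ih]

theorem pv_pairOK_iff (l : List Char) (a : Char) :
    pvPairOK (some a) l = true ↔ ∀ i, i < l.length → (a :: l)[i]? ≠ (a :: l)[i + 1]? := by
  induction l generalizing a with
  | nil => simp [pvPairOK]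
  | cons b t ih =>
    simp only [pvPairOK]
    by_cases h : b = a
    · subst h
      rw [if_pos rfl]
      constructor
      · intro h; cases h
      · intro h; exfalso; exact (h 0 (by simp)) (by simp)
    · rw [if_neg (by simpa using h)]
      rw [ih]
      constructor
      · intro hh i hi
        cases i with
        | zero => simpa using Ne.symm h
        | succ j => exact hh j (by simpa using hi)
      · intro hh j hj
        exact hh (j + 1) (by simpa using hj)

theorem pv_pairOK_none (l : List Char) :
    pvPairOK none l = true ↔ ∀ i, i + 1 < l.length → l[i]? ≠ l[i + 1]? := by
  cases l with
  | nil => simp [pvPairOK]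
  | cons c cs =>
    rw [show pvPairOK none (c :: cs) = pvPairOK (some c) cs from by simp [pvPairOK]]
    rw [pv_pairOK_iff]
    constructor
    · intro h i hi; exact h i (by simpa using hi)
    · intro h i hi; exact h i (by simpa using hi)

theorem pv_adjA_append (s : String) (xs ys : List Int) :
    adjA_valid_rondo s (xs ++ ys) = (adjA_valid_rondo s xs && adjA_valid_rondo s ys) := by
  induction xs with
  | nil => simp [adjA_valid_rondo]
  | cons i is ih =>
    simp only [List.cons_append, adjA_valid_rondo]
    cases PySem.Str.pyGet? s i with
    | none => cases PySem.Str.pyGet? s (i + 1) <;> simpa using ih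
    | some a =>
      cases PySem.Str.pyGet? s (i + 1) with
      | none => simpa using ih
      | some b =>
        by_cases h : a = b <;> simp [h, ih]

theorem pv_adjA_single (s : String) (m : Nat) (hm : m < s.toList.length) :
    adjA_valid_rondo s [(m : Int)] = true ↔ s.toList[m]? ≠ s.toList[m + 1]? := by
  simp only [adjA_valid_rondo]
  rw [show ((m : Int) + 1) = ((m + 1 : Nat) : Int) by push_cast; ring]
  rw [PySem.Str.pyGet?_natCast, PySem.Str.pyGet?_natCast]
  obtain ⟨a, ha⟩ : ∃ a, s.toList[m]? = some a := by
    rcases h : s.toList[m]? with _ | a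
    · exact absurd (List.getElem?_eq_none_iff.1 h) (by omega)
    · exact ⟨a, rfl⟩
  rw [ha]
  rcases h1 : s.toList[m + 1]? with _ | b
  · simp
  · by_cases h : a = b <;> simp [h]

theorem pv_adjA_range (s : String) (m : Nat) (hm : m ≤ s.toList.length) :
    adjA_valid_rondo s (PySem.List.pyRange 0 (m : Int) 1) = true ↔
      ∀ i, i < m → s.toList[i]? ≠ s.toList[i + 1]? := by
  induction m with
  | zero =>
    rw [show PySem.List.pyRange 0 ((0 : Nat) : Int) 1 = [] from by decide]
    simp [adjA_valid_rondo]
  | succ m ih =>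
    rw [show ((m + 1 : Nat) : Int) = (m : Int) + 1 by push_cast; ring]
    rw [PySem.List.pyRange_one_succ_right (by positivity)]
    rw [pv_adjA_append, Bool.and_eq_true]
    rw [ih (by omega), pv_adjA_single s m (by omega)]
    constructor
    · rintro ⟨h1, h2⟩ i hi
      rcases Nat.lt_or_ge i m with h | h
      · exact h1 i h
      · have : i = m := by omega
        subst this; exact h2
    · intro h
      exact ⟨fun i hi => h i (by omega), h m (by omega)⟩

-- assembling the two programs ---------------------------------------------------

theorem pv_main (s : String) (hs : s ≠ "") : valid_rondo s = valid_rondo_alt s := by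
  have hl : s.toList ≠ [] := fun h => hs (String.toList_eq_nil_iff.1 h)
  have hn : 0 < s.toList.length := List.length_pos_iff.2 hl
  have hlen : PySem.Str.len s = (s.toList.length : Int) := by simp [PySem.Str.len]
  have hBJ : "BCDEFGHIJ".toList = pvBJ := by decide
  unfold valid_rondo valid_rondo_alt
  simp only []
  rcases eq_or_ne s.toList.length 1 with h1 | h1
  · rw [if_pos (show PySem.Str.len s = 1 by rw [hlen, h1]; rfl), if_pos h1]
  · rw [if_neg (show ¬PySem.Str.len s = 1 by rw [hlen]; omega), if_neg h1]
    obtain ⟨a, ha⟩ : ∃ a, s.toList[0]? = some a := by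
      rcases h : s.toList[0]? with _ | a
      · rw [List.getElem?_eq_none_iff] at h; omega
      · exact ⟨a, rfl⟩
    obtain ⟨b, hb⟩ : ∃ b, s.toList[s.toList.length - 1]? = some b := by
      rcases h : s.toList[s.toList.length - 1]? with _ | b
      · rw [List.getElem?_eq_none_iff] at h; omega
      · exact ⟨b, rfl⟩
    have hA0 : PySem.Str.pyGet? s 0 = some a := by
      rw [show (0 : Int) = ((0 : Nat) : Int) from rfl, PySem.Str.pyGet?_natCast]; exact ha
    have hBm : PySem.List.pyGet? s.toList (-1) = some b := by
      rw [show (-1 : Int) = -OfNat.ofNat 1 from rfl,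
        PySem.List.pyGet?_neg_ofNat s.toList 1 (by omega) (by omega)]
      exact hb
    have hAm : PySem.Str.pyGet? s (-1) = some b := by
      rw [PySem.Str.pyGet?_eq, PySem.Chars.pyGet?_eq_listPyGet?]; exact hBm
    rw [hA0, hAm, ha, hBm]
    simp only []
    by_cases hA : a = 'A' ∧ b = 'A'
    · rw [if_neg (show ¬¬(a = b ∧ b = 'A') by simp [hA.1, hA.2]),
        if_neg (show ¬(a ≠ 'A' ∨ b ≠ 'A') by simp [hA.1, hA.2])]
      -- the two main checks
      have hfilter : pvBJ.filter (fun c => decide (pvG s.toList c ≠ -1)) = pvPres s.toList :=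
        List.filter_congr (fun c _ => by
          apply decide_eq_decide.2
          rw [Ne, pv_find_neg, not_not])
      have hcons : List.Pairwise (· ≤ ·) ((-1) :: (pvPres s.toList).map (pvG s.toList)) ↔
          List.Pairwise (fun a b => pvG s.toList a ≤ pvG s.toList b) (pvPres s.toList) := by
        rw [List.pairwise_cons, List.pairwise_map]
        constructor
        · exact fun h => h.2
        · intro h
          refine ⟨?_, h⟩
          intro x hx
          rcases List.mem_map.1 hx with ⟨cc, hcc, rfl⟩
          have : 0 ≤ pvG s.toList cc := pv_find_nonneg.2 (pv_pres_mem.1 hcc).2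
          omega
      have hord_iff : loopA_valid_rondo s pvBJ (-1) = true ↔
          pvCollect s.toList = pvPres s.toList := by
        rw [pv_loopA_iff, hfilter, hcons]
        exact pv_ord_iff s.toList
      have hadj_iff : adjA_valid_rondo s (PySem.List.pyRange 0 (PySem.Str.len s - 1) 1) =
          pvPairOK none s.toList := by
        rw [hlen, show (s.toList.length : Int) - 1 = ((s.toList.length - 1 : Nat) : Int) by omega]
        rw [Bool.eq_iff_iff, pv_adjA_range s (s.toList.length - 1) (by omega), pv_pairOK_none]
        constructor
        · intro h i hi; exact h i (by omega)
        · intro h i hi; exact h i (by omega)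
      rw [hBJ, pv_bloop_eq]
      have hcoll : s.toList.foldl bstep_valid_rondo [] = pvCollect s.toList := rfl
      cases hord : loopA_valid_rondo s pvBJ (-1) with
      | false =>
        rw [if_pos rfl]
        have hne : pvCollect s.toList ≠ pvPres s.toList := fun h => by
          rw [hord_iff.2 h] at hord; cases hord
        cases hpk : pvPairOK none s.toList with
        | false => rw [if_neg (by simp)]
        | true =>
          rw [if_pos rfl]
          simp only [hcoll, pv_sorted_eq]
          simp [hne]
      | true =>
        rw [if_neg (by simp)]
        have heq : pvCollect s.toList = pvPres s.toList := hord_iff.1 hord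
        rw [hadj_iff]
        cases hpk : pvPairOK none s.toList with
        | false => rw [if_neg (by simp)]
        | true =>
          rw [if_pos rfl]
          simp only [hcoll, pv_sorted_eq]
          simp [heq]
    · rw [if_pos (show ¬(a = b ∧ b = 'A') from fun h => hA ⟨h.1.trans h.2, h.2⟩),
        if_pos (show a ≠ 'A' ∨ b ≠ 'A' by tauto)]

-- ===== VERDICT (by name: the statement is the Claim_ definition above) =====
theorem valid_rondo_spec : Claim_equal_valid_rondo := by
  unfold Claim_equal_valid_rondo
  intro s _ hs
  unfold Spec_valid_rondo
  exact pv_main s hs
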